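-- pv_equiv track=rewrite | github.com/Gibewevi/MagicClaw | magic_claw/agent/tools.py | _js_like_incomplete_reason
-- ===== SOURCE A (Python) =====
-- def _js_like_incomplete_reason(content: str) -> str | None:
--     stack: list[str] = []
--     pairs = {"(": ")", "[": "]", "{": "}"}
--     closers = {closer: opener for opener, closer in pairs.items()}
--     quote: str | None = None
--     escaped = False
--     line_comment = False
--     block_comment = False
--     index = 0
--     while index < len(content):
--         char = content[index]
--         nxt = content[index + 1] if index + 1 < len(content) else ""
--
--         if line_comment:
--             if char in "\r\n":
--                 line_comment = False
--             index += 1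
--             continue
--         if block_comment:
--             if char == "*" and nxt == "/":
--                 block_comment = False
--                 index += 2
--                 continue
--             index += 1
--             continue
--         if quote:
--             if escaped:
--                 escaped = False
--             elif char == "\\":
--                 escaped = True
--             elif char == quote:
--                 quote = None
--             index += 1
--             continue
--
--         if char == "/" and nxt == "/":
--             line_comment = True
--             index += 2
--             continue
--         if char == "/" and nxt == "*":
--             block_comment = True
--             index += 2
--             continue
--         if char in {"'", '"', "`"}:
--             quote = char
--             index += 1
--             continue
--         if char in pairs:
--             stack.append(char)
--         elif char in closers:
--             if not stack or stack[-1] != closers[char]: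
--                 return f"Unexpected closing {char!r}"
--             stack.pop()
--         index += 1
--
--     if quote:
--         return f"Unterminated {quote!r} string"
--     if block_comment:
--         return "Unterminated block comment"
--     if stack:
--         return f"Unclosed {stack[-1]!r}"
--     return None
-- ===== SOURCE B (Python) =====
-- def _js_like_incomplete_reason(content: str) -> str | None:
--     # Skip-ahead scanner: instead of per-character mode flags, jump over each
--     # string/comment with an inner scan, and match brackets on the fly.
--     closers = {")": "(", "]": "[", "}": "{"}
--     stack: list[str] = []
--     n = len(content)
--     i = 0
--     while i < n:
--         ch = content[i]
--         if ch in "'\"`":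
--             j = i + 1
--             while j < n and content[j] != ch:
--                 j += 2 if content[j] == "\\" else 1
--             if j >= n:
--                 return f"Unterminated {ch!r} string"
--             i = j + 1
--         elif ch == "/" and content[i + 1:i + 2] == "/":
--             j = i + 2
--             while j < n and content[j] not in "\r\n":
--                 j += 1
--             i = j + 1
--         elif ch == "/" and content[i + 1:i + 2] == "*":
--             j = content.find("*/", i + 2)
--             if j == -1:
--                 return "Unterminated block comment"
--             i = j + 2
--         else:
--             if ch in "([{":
--                 stack.append(ch)
--             elif ch in closers:
--                 if not stack or stack[-1] != closers[ch]:
--                     return f"Unexpected closing {ch!r}"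
--                 stack.pop()
--             i += 1
--     if stack:
--         return f"Unclosed {stack[-1]!r}"
--     return None
-- ===== Notes on version B (the rewrite author's own statement) =====
-- stated objective: alternative
-- what changed: Replaces A's single state machine with per-character mode flags (quote/escaped/line_comment/block_comment) by a skip-ahead scanner: on meeting a quote or comment opener an inner scan jumps straight past the whole string/comment (emitting its unterminated message immediately), so the main loop only ever sees code characters and matches brackets.
import Mathlib
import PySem

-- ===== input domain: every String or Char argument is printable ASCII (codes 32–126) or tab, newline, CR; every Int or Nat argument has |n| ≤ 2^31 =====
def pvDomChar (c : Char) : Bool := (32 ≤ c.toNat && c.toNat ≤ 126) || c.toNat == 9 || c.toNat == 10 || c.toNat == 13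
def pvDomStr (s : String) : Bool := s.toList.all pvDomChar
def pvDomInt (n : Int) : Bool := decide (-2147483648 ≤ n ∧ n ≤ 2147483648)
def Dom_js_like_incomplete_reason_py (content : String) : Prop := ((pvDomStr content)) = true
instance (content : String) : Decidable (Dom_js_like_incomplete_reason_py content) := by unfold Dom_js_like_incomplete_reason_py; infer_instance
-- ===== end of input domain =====

-- B replaces A's per-character mode-flag state machine by a skip-ahead scanner (inner scans jump
-- over each string/comment, early-returning its unterminated message) — objective: alternative decomposition.

-- Python repr of a single printable non-backslash character (the only chars the messages quote).
def pyreprChar (c : Char) : String :=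
  if c = '\'' then "\"'\"" else String.ofList ['\'', c, '\'']

-- ===== PORT A =====
-- literal transliteration of A's while-loop: state = (stack, quote, escaped, line_comment, block_comment);
-- the stack is kept head-first (push/pop/peek at the head = Python's append/pop/[-1]).
def goA : List Char → List Char → Option Char → Bool → Bool → Bool → Option String
  | [], stack, quote, _escaped, _lineC, blockC =>
    match quote with
    | some q => some ("Unterminated " ++ pyreprChar q ++ " string")
    | none =>
      if blockC then some "Unterminated block comment"
      else
        match stack with
        | [] => none
        | s :: _ => some ("Unclosed " ++ pyreprChar s)
  | c :: rest, stack, quote, escaped, lineC, blockC =>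
    if lineC then
      if c = '\r' ∨ c = '\n' then goA rest stack quote escaped false blockC
      else goA rest stack quote escaped true blockC
    else if blockC then
      if c = '*' ∧ rest.head? = some '/' then goA rest.tail stack quote escaped lineC false
      else goA rest stack quote escaped lineC true
    else
      match quote with
      | some q =>
        if escaped then goA rest stack quote false lineC blockC
        else if c = '\\' then goA rest stack quote true lineC blockC
        else if c = q then goA rest stack none escaped lineC blockC
        else goA rest stack quote escaped lineC blockC
      | none =>
        if c = '/' ∧ rest.head? = some '/' then goA rest.tail stack quote escaped true blockC
        else if c = '/' ∧ rest.head? = some '*' then goA rest.tail stack quote escaped lineC true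
        else if c = '\'' ∨ c = '"' ∨ c = '`' then goA rest stack (some c) escaped lineC blockC
        else if c = '(' ∨ c = '[' ∨ c = '{' then goA rest (c :: stack) quote escaped lineC blockC
        else if c = ')' ∨ c = ']' ∨ c = '}' then
          let opener : Char := if c = ')' then '(' else if c = ']' then '[' else '{'
          match stack with
          | [] => some ("Unexpected closing " ++ pyreprChar c)
          | o :: stack' =>
            if o ≠ opener then some ("Unexpected closing " ++ pyreprChar c)
            else goA rest stack' quote escaped lineC blockC
        else goA rest stack quote escaped lineC blockC
termination_by cs _ _ _ _ _ => cs.length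
decreasing_by all_goals (simp_all [List.length_tail]; try omega)

def js_like_incomplete_reason_py (content : String) : Option String :=
  goA content.toList [] none false false false

-- ===== PORT B =====
-- Source B's inner quote scan: rest of input after the closing quote, none if the string never ends.
def skipQuote (q : Char) : List Char → Option (List Char)
  | [] => none
  | c :: rest =>
    if c = q then some rest
    else if c = '\\' then
      match rest with
      | [] => none            -- j jumped past the end
      | _ :: rest' => skipQuote q rest'
    else skipQuote q rest

-- Source B's line-comment scan: drop up to and including the first '\r' or '\n'.
def skipLine : List Char → List Char
  | [] => []
  | c :: rest => if c = '\r' ∨ c = '\n' then rest else skipLine rest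

-- Source B's content.find("*/", i+2): scan for the 2-char pattern (exact for this pattern).
def skipBlock : List Char → Option (List Char)
  | [] => none
  | [_] => none
  | c :: d :: rest => if c = '*' ∧ d = '/' then some rest else skipBlock (d :: rest)

-- unconditional step equations (the autogenerated equation lemmas are conditional on the inner branches)
theorem skipQuote_nil (q : Char) : skipQuote q [] = none := by rw [skipQuote.eq_def]
theorem skipQuote_cons (q c : Char) (rest : List Char) : skipQuote q (c :: rest) =
    (if c = q then some rest
     else if c = '\\' then
       (match rest with
        | [] => none
        | _ :: rest' => skipQuote q rest')
     else skipQuote q rest) := by rw [skipQuote.eq_def]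

theorem skipLine_nil : skipLine [] = [] := by rw [skipLine.eq_def]
theorem skipLine_cons (c : Char) (rest : List Char) :
    skipLine (c :: rest) = if c = '\r' ∨ c = '\n' then rest else skipLine rest := by
  rw [skipLine.eq_def]

theorem skipBlock_nil : skipBlock [] = none := by rw [skipBlock.eq_def]
theorem skipBlock_one (c : Char) : skipBlock [c] = none := by rw [skipBlock.eq_def]
theorem skipBlock_cons2 (c d : Char) (rest : List Char) :
    skipBlock (c :: d :: rest) = if c = '*' ∧ d = '/' then some rest else skipBlock (d :: rest) := by
  rw [skipBlock.eq_def]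

theorem skipQuote_le (q : Char) : ∀ (n : Nat) (l : List Char), l.length ≤ n → ∀ l', skipQuote q l = some l' → l'.length ≤ l.length := by
  intro n
  induction n with
  | zero =>
    intro l hl l' h
    have hnil : l = [] := List.eq_nil_of_length_eq_zero (Nat.le_zero.mp hl)
    subst hnil; simp [skipQuote_nil] at h
  | succ n ih =>
    intro l hl l' h
    cases l with
    | nil => simp [skipQuote_nil] at h
    | cons c rest =>
      rw [skipQuote_cons] at h
      by_cases hq : c = q
      · rw [if_pos hq] at h
        cases h; simp only [List.length_cons]; omega
      · rw [if_neg hq] at h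
        by_cases hb : c = '\\'
        · rw [if_pos hb] at h
          cases rest with
          | nil => simp at h
          | cons d rest' =>
            have hlen : rest'.length ≤ n := by simp at hl; omega
            have := ih rest' hlen l' h
            simp only [List.length_cons]; omega
        · rw [if_neg hb] at h
          have hlen : rest.length ≤ n := by simp at hl; omega
          have := ih rest hlen l' h
          simp only [List.length_cons]; omega

theorem skipLine_le : ∀ (l : List Char), (skipLine l).length ≤ l.length := by
  intro l
  induction l with
  | nil => simp [skipLine_nil]
  | cons c rest ih =>
    rw [skipLine_cons]
    by_cases h : c = '\r' ∨ c = '\n'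
    · rw [if_pos h]; simp
    · rw [if_neg h]; simp only [List.length_cons]; omega

theorem skipBlock_le : ∀ (n : Nat) (l : List Char), l.length ≤ n → ∀ l', skipBlock l = some l' → l'.length ≤ l.length := by
  intro n
  induction n with
  | zero =>
    intro l hl l' h
    have hnil : l = [] := List.eq_nil_of_length_eq_zero (Nat.le_zero.mp hl)
    subst hnil; simp [skipBlock_nil] at h
  | succ n ih =>
    intro l hl l' h
    cases l with
    | nil => simp [skipBlock_nil] at h
    | cons c rest =>
      cases rest with
      | nil => simp [skipBlock_one] at h
      | cons d rest' =>
        rw [skipBlock_cons2] at h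
        by_cases hs : c = '*' ∧ d = '/'
        · rw [if_pos hs] at h
          cases h; simp only [List.length_cons]; omega
        · rw [if_neg hs] at h
          have hlen : (d :: rest').length ≤ n := by simp at hl ⊢; omega
          have := ih (d :: rest') hlen l' h
          simp at this ⊢; omega

-- literal transliteration of Source B's main loop (stack head-first).
def goB : List Char → List Char → Option String
  | [], stack =>
    match stack with
    | [] => none
    | s :: _ => some ("Unclosed " ++ pyreprChar s)
  | c :: rest, stack =>
    if c = '\'' ∨ c = '"' ∨ c = '`' then
      match h1 : skipQuote c rest with
      | none => some ("Unterminated " ++ pyreprChar c ++ " string")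
      | some rest' => goB rest' stack
    else if c = '/' ∧ rest.head? = some '/' then goB (skipLine rest.tail) stack
    else if c = '/' ∧ rest.head? = some '*' then
      match h2 : skipBlock rest.tail with
      | none => some "Unterminated block comment"
      | some rest' => goB rest' stack
    else if c = '(' ∨ c = '[' ∨ c = '{' then goB rest (c :: stack)
    else if c = ')' ∨ c = ']' ∨ c = '}' then
      let opener : Char := if c = ')' then '(' else if c = ']' then '[' else '{'
      match stack with
      | [] => some ("Unexpected closing " ++ pyreprChar c)
      | o :: stack' =>
        if o ≠ opener then some ("Unexpected closing " ++ pyreprChar c)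
        else goB rest stack'
    else goB rest stack
termination_by cs _ => cs.length
decreasing_by
  · have := skipQuote_le c rest.length rest (le_refl _) _ h1
    simp only [List.length_cons]; omega
  · have := skipLine_le rest.tail
    have ht : rest.tail.length ≤ rest.length := by cases rest <;> simp
    simp only [List.length_cons]; omega
  · have ht : rest.tail.length ≤ rest.length := by cases rest <;> simp
    have := skipBlock_le rest.tail.length rest.tail (le_refl _) _ h2
    simp only [List.length_cons]; omega
  all_goals simp only [List.length_cons]; omega

def js_like_incomplete_reason_py_alt (content : String) : Option String :=
  goB content.toList []

-- ===== PRECONDITION & SPEC =====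
def Spec_js_like_incomplete_reason_py (content : String) (out : Option String) : Prop := out = js_like_incomplete_reason_py_alt content
instance (content : String) (out : Option String) : Decidable (Spec_js_like_incomplete_reason_py content out) := by unfold Spec_js_like_incomplete_reason_py; infer_instance

-- ===== CLAIM (what is proved, stated in full; the proofs are below) =====
def Claim_equal_js_like_incomplete_reason_py : Prop := ∀ (content : String), Dom_js_like_incomplete_reason_py content → Spec_js_like_incomplete_reason_py content (js_like_incomplete_reason_py content)

-- ===== LEMMAS AND PROOFS =====

theorem goA_nil (stack : List Char) (quote : Option Char) (e l b : Bool) :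
    goA [] stack quote e l b =
      (match quote with
       | some q => some ("Unterminated " ++ pyreprChar q ++ " string")
       | none =>
         if b then some "Unterminated block comment"
         else
           match stack with
           | [] => none
           | s :: _ => some ("Unclosed " ++ pyreprChar s)) := by
  rw [goA.eq_def]

theorem goA_cons (c : Char) (rest stack : List Char) (quote : Option Char) (escaped lineC blockC : Bool) :
    goA (c :: rest) stack quote escaped lineC blockC =
      (if lineC then
        if c = '\r' ∨ c = '\n' then goA rest stack quote escaped false blockC
        else goA rest stack quote escaped true blockC
      else if blockC then
        if c = '*' ∧ rest.head? = some '/' then goA rest.tail stack quote escaped lineC false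
        else goA rest stack quote escaped lineC true
      else
        match quote with
        | some q =>
          if escaped then goA rest stack quote false lineC blockC
          else if c = '\\' then goA rest stack quote true lineC blockC
          else if c = q then goA rest stack none escaped lineC blockC
          else goA rest stack quote escaped lineC blockC
        | none =>
          if c = '/' ∧ rest.head? = some '/' then goA rest.tail stack quote escaped true blockC
          else if c = '/' ∧ rest.head? = some '*' then goA rest.tail stack quote escaped lineC true
          else if c = '\'' ∨ c = '"' ∨ c = '`' then goA rest stack (some c) escaped lineC blockC
          else if c = '(' ∨ c = '[' ∨ c = '{' then goA rest (c :: stack) quote escaped lineC blockC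
          else if c = ')' ∨ c = ']' ∨ c = '}' then
            let opener : Char := if c = ')' then '(' else if c = ']' then '[' else '{'
            match stack with
            | [] => some ("Unexpected closing " ++ pyreprChar c)
            | o :: stack' =>
              if o ≠ opener then some ("Unexpected closing " ++ pyreprChar c)
              else goA rest stack' quote escaped lineC blockC
          else goA rest stack quote escaped lineC blockC) := by
  rw [goA.eq_def]

theorem goB_nil (stack : List Char) :
    goB [] stack =
      (match stack with
       | [] => none
       | s :: _ => some ("Unclosed " ++ pyreprChar s)) := by
  rw [goB.eq_def]

theorem goB_cons (c : Char) (rest stack : List Char) :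
    goB (c :: rest) stack =
      (if c = '\'' ∨ c = '"' ∨ c = '`' then
        match skipQuote c rest with
        | none => some ("Unterminated " ++ pyreprChar c ++ " string")
        | some rest' => goB rest' stack
      else if c = '/' ∧ rest.head? = some '/' then goB (skipLine rest.tail) stack
      else if c = '/' ∧ rest.head? = some '*' then
        match skipBlock rest.tail with
        | none => some "Unterminated block comment"
        | some rest' => goB rest' stack
      else if c = '(' ∨ c = '[' ∨ c = '{' then goB rest (c :: stack)
      else if c = ')' ∨ c = ']' ∨ c = '}' then
        let opener : Char := if c = ')' then '(' else if c = ']' then '[' else '{'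
        match stack with
        | [] => some ("Unexpected closing " ++ pyreprChar c)
        | o :: stack' =>
          if o ≠ opener then some ("Unexpected closing " ++ pyreprChar c)
          else goB rest stack'
      else goB rest stack) := by
  rw [goB.eq_def]
  by_cases hq3 : c = '\'' ∨ c = '"' ∨ c = '`'
  · simp only [if_pos hq3]
    split <;> rename_i heq <;> simp [heq]
  · by_cases hll : c = '/' ∧ rest.head? = some '/'
    · simp [hq3, hll]
    · by_cases hbb : c = '/' ∧ rest.head? = some '*'
      · simp only [if_neg hq3, if_neg hll, if_pos hbb]
        split <;> rename_i heq <;> simp [heq]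
      · simp [hq3, hll, hbb]

theorem quote_bridge (q : Char) (hq : q ≠ '\\') : ∀ (n : Nat) (l : List Char), l.length ≤ n → ∀ stack,
    goA l stack (some q) false false false =
      (match skipQuote q l with
       | none => some ("Unterminated " ++ pyreprChar q ++ " string")
       | some l' => goA l' stack none false false false) := by
  intro n
  induction n with
  | zero =>
    intro l hl stack
    have hnil : l = [] := List.eq_nil_of_length_eq_zero (Nat.le_zero.mp hl)
    subst hnil; simp [goA_nil, skipQuote_nil]
  | succ n ih =>
    intro l hl stack
    cases l with
    | nil => simp [goA_nil, skipQuote_nil]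
    | cons c rest =>
      rw [goA_cons, skipQuote_cons]
      by_cases hcq : c = q
      · subst hcq
        have hcb : ¬ c = '\\' := hq
        simp [hcb]
      · by_cases hcb : c = '\\'
        · subst hcb
          cases rest with
          | nil => simp [hcq, goA_nil]
          | cons d rest' =>
            have hlen : rest'.length ≤ n := by simp at hl; omega
            simp only [hcq, goA_cons, Bool.false_eq_true, if_false, if_true, if_pos rfl, if_neg hcq]
            exact ih rest' hlen stack
        · have hlen : rest.length ≤ n := by simp at hl; omega
          simp only [hcq, hcb, Bool.false_eq_true, if_false, if_neg hcq, if_neg hcb]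
          exact ih rest hlen stack

theorem line_bridge : ∀ (n : Nat) (l : List Char), l.length ≤ n → ∀ stack,
    goA l stack none false true false = goA (skipLine l) stack none false false false := by
  intro n
  induction n with
  | zero =>
    intro l hl stack
    have hnil : l = [] := List.eq_nil_of_length_eq_zero (Nat.le_zero.mp hl)
    subst hnil; simp [goA_nil, skipLine_nil]
  | succ n ih =>
    intro l hl stack
    cases l with
    | nil => simp [goA_nil, skipLine_nil]
    | cons c rest =>
      rw [goA_cons, skipLine_cons]
      by_cases hnl : c = '\r' ∨ c = '\n'
      · simp [hnl]
      · have hlen : rest.length ≤ n := by simp at hl; omega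
        simp only [if_pos rfl, if_neg hnl, if_true]
        simpa using ih rest hlen stack

theorem block_bridge : ∀ (n : Nat) (l : List Char), l.length ≤ n → ∀ stack,
    goA l stack none false false true =
      (match skipBlock l with
       | none => some "Unterminated block comment"
       | some l' => goA l' stack none false false false) := by
  intro n
  induction n with
  | zero =>
    intro l hl stack
    have hnil : l = [] := List.eq_nil_of_length_eq_zero (Nat.le_zero.mp hl)
    subst hnil; simp [goA_nil, skipBlock_nil]
  | succ n ih =>
    intro l hl stack
    cases l with
    | nil => simp [goA_nil, skipBlock_nil]
    | cons c rest =>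
      cases rest with
      | nil =>
        rw [goA_cons]
        simp [goA_nil, skipBlock_one]
      | cons d rest' =>
        rw [goA_cons, skipBlock_cons2]
        by_cases hs : c = '*' ∧ d = '/'
        · have hcond : c = '*' ∧ (d :: rest').head? = some '/' := by simpa using hs
          simp [hcond, hs]
        · have hcond : ¬ (c = '*' ∧ (d :: rest').head? = some '/') := by simpa using hs
          have hlen : (d :: rest').length ≤ n := by simp at hl ⊢; omega
          simp only [Bool.false_eq_true, if_false, if_true, hcond, hs, if_neg]
          simpa using ih (d :: rest') hlen stack

theorem goA_goB : ∀ (n : Nat) (cs : List Char), cs.length ≤ n → ∀ stack,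
    goA cs stack none false false false = goB cs stack := by
  intro n
  induction n with
  | zero =>
    intro cs hl stack
    have hnil : cs = [] := List.eq_nil_of_length_eq_zero (Nat.le_zero.mp hl)
    subst hnil; simp [goA_nil, goB_nil]
  | succ n ih =>
    intro cs hl stack
    cases cs with
    | nil => simp [goA_nil, goB_nil]
    | cons c rest =>
      have hrlen : rest.length ≤ n := by simp at hl; omega
      rw [goA_cons, goB_cons]
      by_cases hq3 : c = '\'' ∨ c = '"' ∨ c = '`'
      · have hslash : ¬ c = '/' := by rcases hq3 with h | h | h <;> subst h <;> decide
        have hbsl : c ≠ '\\' := by rcases hq3 with h | h | h <;> subst h <;> decide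
        have hll : ¬ (c = '/' ∧ rest.head? = some '/') := fun h => hslash h.1
        have hbb : ¬ (c = '/' ∧ rest.head? = some '*') := fun h => hslash h.1
        rw [if_neg (by decide), if_neg (by decide), if_neg hll, if_neg hbb, if_pos hq3, if_pos hq3]
        rw [quote_bridge c hbsl rest.length rest (le_refl _) stack]
        cases hsq : skipQuote c rest with
        | none => simp
        | some l' =>
          have hlen' : l'.length ≤ n := le_trans (skipQuote_le c rest.length rest (le_refl _) l' hsq) hrlen
          simp only
          exact ih l' hlen' stack
      · by_cases hll : c = '/' ∧ rest.head? = some '/'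
        · rw [if_neg (by decide), if_neg (by decide), if_pos hll, if_neg hq3, if_pos hll]
          rw [line_bridge rest.tail.length rest.tail (le_refl _) stack]
          have ht : rest.tail.length ≤ rest.length := by cases rest <;> simp
          have hlen' : (skipLine rest.tail).length ≤ n :=
            le_trans (le_trans (skipLine_le rest.tail) ht) hrlen
          exact ih _ hlen' stack
        · by_cases hbb : c = '/' ∧ rest.head? = some '*'
          · rw [if_neg (by decide), if_neg (by decide), if_neg hll, if_pos hbb, if_neg hq3, if_neg hll, if_pos hbb]
            rw [block_bridge rest.tail.length rest.tail (le_refl _) stack]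
            have ht : rest.tail.length ≤ rest.length := by cases rest <;> simp
            cases hsb : skipBlock rest.tail with
            | none => simp
            | some l' =>
              have hlen' : l'.length ≤ n :=
                le_trans (le_trans (skipBlock_le rest.tail.length rest.tail (le_refl _) l' hsb) ht) hrlen
              simp only
              exact ih l' hlen' stack
          · rw [if_neg (by decide), if_neg (by decide), if_neg hll, if_neg hbb, if_neg hq3, if_neg hq3, if_neg hll, if_neg hbb]
            by_cases hop : c = '(' ∨ c = '[' ∨ c = '{'
            · rw [if_pos hop, if_pos hop]
              exact ih rest hrlen (c :: stack)
            · rw [if_neg hop, if_neg hop]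
              by_cases hcl : c = ')' ∨ c = ']' ∨ c = '}'
              · rw [if_pos hcl, if_pos hcl]
                cases stack with
                | nil => simp
                | cons o stack' =>
                  simp only
                  by_cases ho : o ≠ (if c = ')' then '(' else if c = ']' then '[' else '{')
                  · rw [if_pos ho, if_pos ho]
                  · rw [if_neg ho, if_neg ho]
                    exact ih rest hrlen stack'
              · rw [if_neg hcl, if_neg hcl]
                exact ih rest hrlen stack

-- ===== VERDICT (by name: the statement is the Claim_ definition above) =====
theorem js_like_incomplete_reason_py_spec : Claim_equal_js_like_incomplete_reason_py := by
  intro content _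
  unfold Spec_js_like_incomplete_reason_py js_like_incomplete_reason_py js_like_incomplete_reason_py_alt
  exact goA_goB content.toList.length content.toList (le_refl _) []
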